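-- pv_equiv track=rewrite | github.com/tsukuro19/Algorithm-Exercise | Hackerrank/Problem Solving (Basic) Skills Certification Test/vowel_substring(naive).py | Check_vowel
-- ===== SOURCE A (Python) =====
-- def Check_vowel(string,sub_length):
--     vowel=['a','e','i','o','u']
--     max_count_vowel,result_string=0,""
--     step=0
--     while step+sub_length<=len(string):
--         count_vowel=0
--         for i in range(step,step+sub_length):
--             if string[i] in vowel:
--                 count_vowel+=1
--         if count_vowel>max_count_vowel:
--             result_string=string[step:step+sub_length]
--             max_count_vowel=count_vowel
--         step+=1
--     if result_string=="":
--         return "Not found!"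
--     return result_string
-- ===== SOURCE B (Python) =====
-- def Check_vowel(string, sub_length):
--     n = len(string)
--     k = sub_length
--     if k < 0 or k > n:
--         return "Not found!"
--     # prefix sums of vowel counts: pre[i] = number of vowels in string[:i]
--     pre = [0]
--     acc = 0
--     for c in string:
--         if c in "aeiou":
--             acc += 1
--         pre.append(acc)
--     best, best_i = 0, -1
--     for i in range(n - k + 1):
--         cnt = pre[i + k] - pre[i]
--         if cnt > best:
--             best, best_i = cnt, i
--     if best == 0:
--         return "Not found!"
--     return string[best_i:best_i + k]
-- ===== Notes on version B (the rewrite author's own statement) =====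
-- stated objective: faster
-- what changed: B precomputes a prefix-sum array of vowel counts once and finds the best window with one O(n) scan of pre[i+k]-pre[i], instead of A's recounting the vowels of every window from scratch.
import Mathlib
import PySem

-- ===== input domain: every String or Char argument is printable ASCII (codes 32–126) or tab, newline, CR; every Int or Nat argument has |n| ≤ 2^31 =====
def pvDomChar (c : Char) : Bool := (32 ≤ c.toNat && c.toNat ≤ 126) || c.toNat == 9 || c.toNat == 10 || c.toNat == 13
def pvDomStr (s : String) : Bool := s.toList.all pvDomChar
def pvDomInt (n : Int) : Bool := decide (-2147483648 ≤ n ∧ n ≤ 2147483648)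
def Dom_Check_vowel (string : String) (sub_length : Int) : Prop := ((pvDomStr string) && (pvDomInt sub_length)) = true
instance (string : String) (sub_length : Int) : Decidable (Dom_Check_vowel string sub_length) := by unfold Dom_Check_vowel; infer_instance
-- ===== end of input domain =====

-- B replaces A's per-window vowel recount with a prefix-sum array and one scan; same first-maximal window, same "Not found!" fallback.


-- ===== PORT A =====
-- vowel=['a','e','i','o','u']
def pvVowels : List Char := ['a', 'e', 'i', 'o', 'u']

-- for i in range(step,step+sub_length): if string[i] in vowel: count_vowel+=1
-- (when A runs this, the index i is always in range; the 'none' branch of pyGet? is unreachable)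
def pvAInner (s : List Char) (a b : Int) : Int :=
  (PySem.List.pyRange a b).foldl
    (fun cnt i =>
      if (match PySem.List.pyGet? s i with
          | some c => pvVowels.contains c
          | none => false) then cnt + 1 else cnt) 0

-- the while loop of A; fuel = the number of iterations (step+sub_length <= len(string))
def pvALoop (s : List Char) (k : Int) : Nat → Int → Int → String → String
  | 0, _, _, res => res
  | fuel + 1, step, maxc, res =>
    let cnt := pvAInner s step (step + k)
    if cnt > maxc then
      pvALoop s k fuel (step + 1) cnt
        (String.ofList (PySem.List.slice s (some step) (some (step + k))))
    else
      pvALoop s k fuel (step + 1) maxc res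

def Check_vowel (string : String) (sub_length : Int) : String :=
  let s := string.toList
  let res := pvALoop s sub_length ((s.length : Int) - sub_length + 1).toNat 0 0 ""
  if res = "" then "Not found!" else res

-- ===== PORT B =====
-- pre = [0]; acc = 0; for c in string: acc += (c in "aeiou"); pre.append(acc)
def pvBPre (s : List Char) : Int × List Int :=
  s.foldl
    (fun p c =>
      let acc := p.1 + (if ("aeiou".toList).contains c then 1 else 0)
      (acc, p.2 ++ [acc]))
    (0, [0])

-- for i in range(n-k+1): cnt = pre[i+k]-pre[i]; update (best, best_i) on strict improvement
-- (both pre-indices are always in range here; the 'getD 0' default is unreachable)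
def pvBLoop (pre : List Int) (k : Int) : Nat → Int → Int × Int → Int × Int
  | 0, _, st => st
  | fuel + 1, i, (best, besti) =>
    let cnt := (PySem.List.pyGet? pre (i + k)).getD 0 - (PySem.List.pyGet? pre i).getD 0
    if cnt > best then pvBLoop pre k fuel (i + 1) (cnt, i)
    else pvBLoop pre k fuel (i + 1) (best, besti)

def Check_vowel_alt (string : String) (sub_length : Int) : String :=
  let s := string.toList
  let n : Int := s.length
  let k := sub_length
  if k < 0 ∨ n < k then "Not found!"
  else
    let pre := (pvBPre s).2
    let r := pvBLoop pre k (n - k + 1).toNat 0 (0, -1)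
    if r.1 = 0 then "Not found!"
    else String.ofList (PySem.List.slice s (some r.2) (some (r.2 + k)))

-- ===== PRECONDITION & SPEC =====
def Spec_Check_vowel (string : String) (sub_length : Int) (out : String) : Prop := out = Check_vowel_alt string sub_length
instance (string : String) (sub_length : Int) (out : String) : Decidable (Spec_Check_vowel string sub_length out) := by unfold Spec_Check_vowel; infer_instance

-- ===== CLAIM (what is proved, stated in full; the proofs are below) =====
def Claim_equal_Check_vowel : Prop := ∀ (string : String) (sub_length : Int), Dom_Check_vowel string sub_length → Spec_Check_vowel string sub_length (Check_vowel string sub_length)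

-- ===== LEMMAS AND PROOFS =====

-- number of vowels in a list of characters, as an Int
def pvCnt (l : List Char) : Int := (l.countP (fun c => pvVowels.contains c) : Int)

theorem pvCnt_append (l m : List Char) : pvCnt (l ++ m) = pvCnt l + pvCnt m := by
  simp [pvCnt, List.countP_append]

-- B's fold builds exactly the prefix-sum table of vowel counts
theorem pvBPre_spec (s : List Char) :
    pvBPre s = (pvCnt s, (List.range (s.length + 1)).map (fun i => pvCnt (s.take i))) := by
  induction s using List.reverseRecOn with
  | nil => rfl
  | append_singleton s c ih =>
    have hl : ("aeiou".toList) = pvVowels := rfl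
    have hv : (if ("aeiou".toList).contains c then (1:Int) else 0) = pvCnt [c] := by
      rw [hl]
      by_cases h : pvVowels.contains c <;> simp [pvCnt, List.countP_singleton]
    have hc : pvCnt (s ++ [c]) = pvCnt s + (if ("aeiou".toList).contains c then (1:Int) else 0) := by
      rw [pvCnt_append, hv]
    rw [pvBPre, List.foldl_append]
    rw [pvBPre] at ih
    rw [ih]
    simp only [List.foldl_cons, List.foldl_nil]
    refine Prod.ext ?_ ?_
    · simpa using hc.symm
    · show _ ++ _ = _
      have hrange : List.range (s.length + 1 + 1) = List.range (s.length + 1) ++ [s.length + 1] :=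
        List.range_succ
      have hmapeq : (List.range (s.length + 1)).map (fun i => pvCnt ((s ++ [c]).take i))
          = (List.range (s.length + 1)).map (fun i => pvCnt (s.take i)) := by
        refine List.map_congr_left ?_
        intro i hi
        rw [List.mem_range] at hi
        rw [List.take_append_of_le_length (by omega)]
      simp only [List.length_append, List.length_singleton, hrange, List.map_append, hmapeq,
        List.map_cons, List.map_nil]
      rw [List.take_of_length_le (by simp)]
      rw [hc]

theorem pvBPre_get (s : List Char) (i : Int) (h0 : 0 ≤ i) (h1 : i ≤ (s.length : Int)) :
    (PySem.List.pyGet? (pvBPre s).2 i).getD 0 = pvCnt (s.take i.toNat) := by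
  rw [pvBPre_spec, PySem.List.pyGet?_of_nonneg _ h0]
  have hlt : i.toNat < s.length + 1 := by omega
  simp [List.getElem?_map, List.getElem?_range hlt]

-- A's inner recount over a window is the vowel count of that window
theorem pvAInner_spec (s : List Char) (m : Nat) : ∀ (a : Int), 0 ≤ a →
    a + m ≤ (s.length : Int) →
    pvAInner s a (a + m) = pvCnt ((s.drop a.toNat).take m) := by
  have hfold : ∀ a b : Int, pvAInner s a b =
      (((PySem.List.pyRange a b).countP
        (fun i => match PySem.List.pyGet? s i with
          | some c => pvVowels.contains c
          | none => false) : Nat) : Int) := by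
    intro a b
    rw [pvAInner, PySem.List.foldl_if_add_one]
    simp
  induction m with
  | zero =>
    intro a h0 h1
    rw [hfold, show a + ((0:Nat):Int) = a by simp, PySem.List.pyRange_one_eq_nil le_rfl]
    rfl
  | succ m ih =>
    intro a h0 h1
    have ha : a < (s.length : Int) := by push_cast at h1 ⊢; omega
    have hlt : a.toNat < s.length := by omega
    have hdrop : s.drop a.toNat = s[a.toNat] :: s.drop (a.toNat + 1) :=
      (List.getElem_cons_drop hlt).symm
    have hnext := ih (a + 1) (by omega) (by push_cast at h1 ⊢; omega)
    have ht : (a + 1).toNat = a.toNat + 1 := by omega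
    rw [hfold] at hnext ⊢
    rw [show a + ((m+1:Nat):Int) = (a+1) + (m:Nat) by push_cast; ring]
    rw [PySem.List.pyRange_one_cons (by omega), List.countP_cons]
    rw [PySem.List.pyGet?_eq_some_getElem s h0 ha]
    rw [hdrop, List.take_succ_cons]
    rw [ht] at hnext
    by_cases h : pvVowels.contains s[a.toNat] <;> simp_all [pvCnt]

theorem pvWindow (s : List Char) (i k : Nat) :
    pvCnt (s.take (i + k)) - pvCnt (s.take i) = pvCnt ((s.drop i).take k) := by
  rw [List.take_add, pvCnt_append]; ring

-- the invariant tying A's result string to B's (best, best_i) state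
def pvRel (s : List Char) (k : Int) (res : String) (p : Int × Int) : Prop :=
  0 ≤ p.1 ∧ (p.1 = 0 → res = "") ∧
  (0 < p.1 → res = String.ofList (PySem.List.slice s (some p.2) (some (p.2 + k))) ∧ res ≠ "")

theorem pvLoop_rel (s : List Char) (k : Int) (hk0 : 0 ≤ k) (_hkn : k ≤ (s.length : Int)) :
    ∀ (fuel : Nat) (i m bi : Int) (res : String), 0 ≤ i →
      i + fuel = (s.length : Int) - k + 1 →
      pvRel s k res (m, bi) →
      pvRel s k (pvALoop s k fuel i m res) (pvBLoop (pvBPre s).2 k fuel i (m, bi)) := by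
  intro fuel
  induction fuel with
  | zero => intro i m bi res _ _ hrel; exact hrel
  | succ fuel ih =>
    intro i m bi res h0 hiter hrel
    have hik : i + k ≤ (s.length : Int) := by omega
    have htk : (i + k).toNat = i.toNat + k.toNat := by omega
    -- both counts are the vowel count of the window starting at i
    have hw : pvAInner s i (i + k) = pvCnt ((s.drop i.toNat).take k.toNat) := by
      have := pvAInner_spec s k.toNat i h0 (by omega)
      rwa [show i + (k.toNat : Int) = i + k by omega] at this
    have hwB : (PySem.List.pyGet? (pvBPre s).2 (i + k)).getD 0
        - (PySem.List.pyGet? (pvBPre s).2 i).getD 0 = pvCnt ((s.drop i.toNat).take k.toNat) := by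
      rw [pvBPre_get s (i + k) (by omega) hik, pvBPre_get s i h0 (by omega), htk]
      exact pvWindow s i.toNat k.toNat
    rw [pvALoop, pvBLoop]
    simp only [hw, hwB]
    by_cases hgt : pvCnt ((s.drop i.toNat).take k.toNat) > m
    · simp only [hgt, if_true]
      apply ih (i + 1) _ i _ (by omega) (by omega)
      have hpos : 0 < pvCnt ((s.drop i.toNat).take k.toNat) := lt_of_le_of_lt hrel.1 hgt
      refine ⟨le_of_lt hpos, fun h => absurd h (by omega), fun _ => ⟨rfl, ?_⟩⟩
      have hslice : PySem.List.slice s (some i) (some (i + k))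
          = (s.drop i.toNat).take ((i + k).toNat - i.toNat) :=
        PySem.List.slice_of_nonneg s h0 (by omega) (by omega) hik
      have hne : (s.drop i.toNat).take k.toNat ≠ [] := by
        intro hnil
        rw [pvCnt, hnil] at hpos
        simp at hpos
      rw [hslice, show (i + k).toNat - i.toNat = k.toNat by omega]
      intro hcon
      apply hne
      have := congrArg String.toList hcon
      simpa using this
    · simp only [hgt, if_false]
      exact ih (i + 1) m bi res (by omega) (by omega) hrel

-- with a negative sub_length every inner range is empty, so A never updates its state
theorem pvALoop_nil (s : List Char) (k : Int) (hk : k < 0) :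
    ∀ (fuel : Nat) (i : Int), pvALoop s k fuel i 0 "" = "" := by
  intro fuel
  induction fuel with
  | zero => intro i; rfl
  | succ n ih =>
    intro i
    have h : pvAInner s i (i + k) = 0 := by
      rw [pvAInner, PySem.List.pyRange_one_eq_nil (by omega)]; rfl
    simp [pvALoop, h, ih]

theorem Check_vowel_eq (string : String) (sub_length : Int) :
    Check_vowel string sub_length = Check_vowel_alt string sub_length := by
  set s := string.toList with hs
  set n : Int := (s.length : Int) with hn
  set k := sub_length with hk
  by_cases hneg : k < 0
  · rw [Check_vowel, Check_vowel_alt]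
    simp only [← hs, ← hn, hneg, true_or, if_true]
    rw [pvALoop_nil s k hneg]
    simp
  · by_cases hbig : n < k
    · rw [Check_vowel, Check_vowel_alt]
      simp only [← hs, ← hn, hbig, or_true, if_true]
      have : (n - k + 1).toNat = 0 := by omega
      rw [this]
      simp [pvALoop]
    · have hk0 : 0 ≤ k := by omega
      have hkn : k ≤ n := by omega
      have hfuel : ((n - k + 1).toNat : Int) = n - k + 1 := by omega
      have hrel := pvLoop_rel s k hk0 hkn (n - k + 1).toNat 0 0 (-1) "" le_rfl
        (by rw [hfuel]; ring)
        ⟨le_rfl, fun _ => rfl, fun h => absurd h (by omega)⟩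
      rw [Check_vowel, Check_vowel_alt]
      simp only [← hs, ← hn, hneg, hbig, or_self, if_false]
      obtain ⟨hpos, hzero, hup⟩ := hrel
      set r := pvBLoop (pvBPre s).2 k (n - k + 1).toNat 0 (0, -1) with hr
      by_cases h1 : r.1 = 0
      · rw [hzero h1]
        simp [h1]
      · have := hup (by omega)
        simp only [h1, if_false]
        rw [this.1]
        rw [if_neg (this.1 ▸ this.2)]

-- ===== VERDICT (by name: the statement is the Claim_ definition above) =====
theorem Check_vowel_spec : Claim_equal_Check_vowel := by
  intro string sub_length _
  exact Check_vowel_eq string sub_length
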